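-- pv_equiv track=rewrite | github.com/aka-sergey/Hobbes | scripts/remote/hobbes_tavily_search.py | domain_weight
-- ===== SOURCE A (Python) =====
-- PREFERRED_DOMAIN_WEIGHTS = {
--     "reuters.com": 120,
--     "apnews.com": 115,
--     "bloomberg.com": 110,
--     "ft.com": 108,
--     "wsj.com": 108,
--     "nytimes.com": 106,
--     "bbc.com": 104,
--     "bbc.co.uk": 104,
--     "aljazeera.com": 103,
--     "cnbc.com": 100,
--     "npr.org": 99,
--     "gcaptain.com": 96,
-- }
--
-- LOW_SIGNAL_DOMAIN_PENALTIES = {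
--     "unn.ua": -25,
-- }
--
-- def domain_weight(domain: str) -> int:
--     if domain in PREFERRED_DOMAIN_WEIGHTS:
--         return PREFERRED_DOMAIN_WEIGHTS[domain]
--     for candidate, weight in PREFERRED_DOMAIN_WEIGHTS.items():
--         if domain.endswith(f".{candidate}"):
--             return weight
--     if domain in LOW_SIGNAL_DOMAIN_PENALTIES:
--         return LOW_SIGNAL_DOMAIN_PENALTIES[domain]
--     for candidate, penalty in LOW_SIGNAL_DOMAIN_PENALTIES.items():
--         if domain.endswith(f".{candidate}"):
--             return penalty
--     return 0
-- ===== SOURCE B (Python) =====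
-- PREFERRED_DOMAIN_WEIGHTS = {
--     "reuters.com": 120,
--     "apnews.com": 115,
--     "bloomberg.com": 110,
--     "ft.com": 108,
--     "wsj.com": 108,
--     "nytimes.com": 106,
--     "bbc.com": 104,
--     "bbc.co.uk": 104,
--     "aljazeera.com": 103,
--     "cnbc.com": 100,
--     "npr.org": 99,
--     "gcaptain.com": 96,
-- }
--
-- LOW_SIGNAL_DOMAIN_PENALTIES = {
--     "unn.ua": -25,
-- }
--
-- _WEIGHTS = {**PREFERRED_DOMAIN_WEIGHTS, **LOW_SIGNAL_DOMAIN_PENALTIES}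
--
--
-- def domain_weight(domain: str) -> int:
--     # Generate candidate keys from the input (the domain itself, then each
--     # parent suffix after a '.'), longest first; return the first hit.
--     w = _WEIGHTS.get(domain)
--     if w is not None:
--         return w
--     dot = domain.find(".")
--     if dot < 0:
--         return 0
--     return domain_weight(domain[dot + 1:])
-- ===== Notes on version B (the rewrite author's own statement) =====
-- stated objective: idiomatic
-- what changed: Instead of scanning both weight tables with endswith per entry, B merges them into one dict and recursively strips the leading label off the input, doing an O(1) dict lookup per candidate suffix; correctness rests on no table key being a dotted suffix of another.
import Mathlib
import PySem

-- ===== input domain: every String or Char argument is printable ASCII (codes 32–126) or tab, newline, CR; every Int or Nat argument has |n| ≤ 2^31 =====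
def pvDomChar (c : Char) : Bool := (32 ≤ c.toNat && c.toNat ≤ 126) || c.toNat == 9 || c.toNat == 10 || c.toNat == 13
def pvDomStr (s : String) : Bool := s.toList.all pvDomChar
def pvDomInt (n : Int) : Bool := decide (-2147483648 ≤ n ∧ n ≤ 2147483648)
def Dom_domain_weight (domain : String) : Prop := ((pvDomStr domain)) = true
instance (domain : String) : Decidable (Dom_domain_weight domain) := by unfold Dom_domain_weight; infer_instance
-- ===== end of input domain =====

-- B replaces A's endswith scans over two tables by one merged dict and a
-- recursion that strips the leading label of the input, one lookup per
-- candidate suffix (objective: idiomatic; same behaviour, no speed claim).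

-- ===== PORT A =====
def pvPrefItems : List (String × Int) :=
  [("reuters.com", 120), ("apnews.com", 115), ("bloomberg.com", 110),
   ("ft.com", 108), ("wsj.com", 108), ("nytimes.com", 106), ("bbc.com", 104),
   ("bbc.co.uk", 104), ("aljazeera.com", 103), ("cnbc.com", 100),
   ("npr.org", 99), ("gcaptain.com", 96)]

def pvLowItems : List (String × Int) := [("unn.ua", -25)]

def pvPref : PySem.Dict String Int := PySem.Dict.mk pvPrefItems
def pvLow : PySem.Dict String Int := PySem.Dict.mk pvLowItems

-- the two 'for candidate, weight in D.items(): if domain.endswith("." + candidate)' loops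
def pvScan : List (String × Int) → String → Option Int
  | [], _ => none
  | (c, w) :: rest, domain =>
    if PySem.Str.endswith domain ("." ++ c) then some w else pvScan rest domain

def domain_weight (domain : String) : Int :=
  match pvPref.get? domain with
  | some w => w
  | none =>
    match pvScan pvPrefItems domain with
    | some w => w
    | none =>
      match pvLow.get? domain with
      | some w => w
      | none =>
        match pvScan pvLowItems domain with
        | some w => w
        | none => 0

-- ===== PORT B =====
-- _WEIGHTS = {**PREFERRED_DOMAIN_WEIGHTS, **LOW_SIGNAL_DOMAIN_PENALTIES}: the
-- key sets are disjoint, so the merged dict's items are the concatenation.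
def pvWeightsItems : List (String × Int) := pvPrefItems ++ pvLowItems
def pvWeights : PySem.Dict String Int := PySem.Dict.mk pvWeightsItems

-- 'dot = cand.find "."' followed by 'cand[dot+1:]' (taken only when dot ≥ 0),
-- fused into one helper: some (suffix after the FIRST '.'), none iff no '.'.
def pvAfterDot : List Char → Option (List Char)
  | [] => none
  | c :: rest => if c = '.' then some rest else pvAfterDot rest

theorem pvAfterDot_length : ∀ (l r : List Char), pvAfterDot l = some r → r.length < l.length := by
  intro l
  induction l with
  | nil => intro r h; simp [pvAfterDot] at h
  | cons c rest ih =>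
    intro r h
    by_cases hc : c = '.'
    · simp [pvAfterDot, hc] at h; subst h; simp
    · simp [pvAfterDot, hc] at h
      exact Nat.lt_trans (ih r h) (by simp)

def pvDW (cand : List Char) : Int :=
  match pvWeights.get? (String.ofList cand) with
  | some w => w
  | none =>
    match hdot : pvAfterDot cand with
    | none => 0
    | some rest => pvDW rest
termination_by cand.length
decreasing_by exact pvAfterDot_length _ _ hdot

def domain_weight_alt (domain : String) : Int := pvDW domain.toList

-- ===== PRECONDITION & SPEC =====
def Spec_domain_weight (domain : String) (out : Int) : Prop := out = domain_weight_alt domain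
instance (domain : String) (out : Int) : Decidable (Spec_domain_weight domain out) := by unfold Spec_domain_weight; infer_instance

-- ===== CLAIM (what is proved, stated in full; the proofs are below) =====
def Claim_equal_domain_weight : Prop := ∀ (domain : String), Dom_domain_weight domain → Spec_domain_weight domain (domain_weight domain)

-- ===== LEMMAS AND PROOFS =====

-- a candidate key k "matches" l if l is exactly k or l ends with "." ++ k
def pvMatch (l : List Char) (k : String) : Bool :=
  (l == k.toList) || ('.' :: k.toList).isSuffixOf l

theorem pvMatch_iff (l : List Char) (k : String) :
    pvMatch l k = true ↔ (l = k.toList ∨ ('.' :: k.toList) <:+ l) := by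
  simp [pvMatch, List.isSuffixOf_iff_suffix]

-- first entry of the table whose key matches l
def pvFind : List (String × Int) → List Char → Option Int
  | [], _ => none
  | (k, w) :: rest, l => if pvMatch l k then some w else pvFind rest l

-- no key of the merged table is "." ++ another key (checked on the literals)
theorem pvNoDotSuffix :
    ∀ p ∈ pvWeightsItems, ∀ q ∈ pvWeightsItems, ¬ (('.' :: p.1.toList) <:+ q.1.toList) := by
  decide

theorem pvNodup : (pvWeightsItems.map Prod.fst).Nodup := by decide

-- at most one key of the table matches any given l
theorem pvUniq (l : List Char) (k1 k2 : String)
    (h1 : k1 ∈ pvWeightsItems.map Prod.fst) (h2 : k2 ∈ pvWeightsItems.map Prod.fst)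
    (m1 : pvMatch l k1 = true) (m2 : pvMatch l k2 = true) : k1 = k2 := by
  rw [pvMatch_iff] at m1 m2
  obtain ⟨p1, hp1, hp1e⟩ := List.mem_map.mp h1
  obtain ⟨p2, hp2, hp2e⟩ := List.mem_map.mp h2
  have nds12 : ¬ ('.' :: k1.toList) <:+ k2.toList := by
    have := pvNoDotSuffix p1 hp1 p2 hp2
    rwa [hp1e, hp2e] at this
  have nds21 : ¬ ('.' :: k2.toList) <:+ k1.toList := by
    have := pvNoDotSuffix p2 hp2 p1 hp1
    rwa [hp1e, hp2e] at this
  rcases m1 with e1 | d1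
  · rcases m2 with e2 | d2
    · exact String.toList_inj.mp (e1.symm.trans e2)
    · rw [e1] at d2
      exact absurd d2 nds21
  · rcases m2 with e2 | d2
    · rw [e2] at d1
      exact absurd d1 nds12
    · rcases List.suffix_or_suffix_of_suffix d1 d2 with hcmp | hcmp
      · rcases List.suffix_cons_iff.mp hcmp with he | hs
        · have h' : k1.toList = k2.toList := by injection he
          exact String.toList_inj.mp h'
        · exact absurd hs nds12
      · rcases List.suffix_cons_iff.mp hcmp with he | hs
        · have h' : k2.toList = k1.toList := by injection he
          exact (String.toList_inj.mp h').symm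
        · exact absurd hs nds21

theorem pvFind_eq_some (items : List (String × Int)) (l : List Char) (k0 : String) (w0 : Int)
    (hmem : (k0, w0) ∈ items) (hM : pvMatch l k0 = true)
    (huniq : ∀ k1 k2, k1 ∈ items.map Prod.fst → k2 ∈ items.map Prod.fst →
      pvMatch l k1 = true → pvMatch l k2 = true → k1 = k2)
    (hnd : (items.map Prod.fst).Nodup) : pvFind items l = some w0 := by
  induction items with
  | nil => simp at hmem
  | cons p rest ih =>
    obtain ⟨k, w⟩ := p
    simp only [pvFind]
    by_cases hc : pvMatch l k = true
    · simp only [hc, if_true]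
      have hk : k0 = k :=
        (huniq k k0 (by simp) (List.mem_map.mpr ⟨(k0, w0), hmem, rfl⟩) hc hM).symm
      subst hk
      rcases List.mem_cons.mp hmem with heq | hmem'
      · injection heq with _ hw
        rw [hw]
      · exfalso
        have : k0 ∈ rest.map Prod.fst := List.mem_map.mpr ⟨(k0, w0), hmem', rfl⟩
        exact (List.nodup_cons.mp hnd).1 this
    · simp only [hc, Bool.false_eq_true, if_false]
      rcases List.mem_cons.mp hmem with heq | hmem'
      · exfalso
        injection heq with hk _
        rw [hk] at hM
        exact hc hM
      · exact ih hmem'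
          (fun a b ha hb => huniq a b (List.mem_cons_of_mem _ ha) (List.mem_cons_of_mem _ hb))
          (List.nodup_cons.mp hnd).2

theorem pvFind_eq_none (items : List (String × Int)) (l : List Char)
    (h : ∀ p ∈ items, pvMatch l p.1 = false) : pvFind items l = none := by
  induction items with
  | nil => simp [pvFind]
  | cons p rest ih =>
    obtain ⟨k, w⟩ := p
    have hk := h (k, w) (List.mem_cons_self ..)
    simp only [pvFind, hk]
    simp only [Bool.false_eq_true, if_false]
    exact ih (fun q hq => h q (List.mem_cons_of_mem _ hq))

theorem pvFind_congr (items : List (String × Int)) (l l' : List Char)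
    (h : ∀ p ∈ items, pvMatch l p.1 = pvMatch l' p.1) :
    pvFind items l = pvFind items l' := by
  induction items with
  | nil => simp [pvFind]
  | cons p rest ih =>
    obtain ⟨k, w⟩ := p
    have hk := h (k, w) (List.mem_cons_self ..)
    simp only [pvFind, hk]
    split <;> [rfl; exact ih (fun q hq => h q (List.mem_cons_of_mem _ hq))]

theorem pvGet?_some_mem (items : List (String × Int)) (s : String) (w : Int)
    (h : (PySem.Dict.mk items).get? s = some w) : (s, w) ∈ items := by
  induction items with
  | nil => simp [PySem.Dict.get?] at h
  | cons p rest ih =>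
    obtain ⟨k, v⟩ := p
    rw [PySem.Dict.get?_mk_cons] at h
    by_cases hk : k == s
    · simp [hk] at h
      subst h
      have : k = s := by simpa using hk
      subst this
      exact List.mem_cons_self ..
    · simp only [hk, Bool.false_eq_true, if_false] at h
      exact List.mem_cons_of_mem _ (ih h)

theorem pvGet?_none (items : List (String × Int)) (s : String)
    (h : (PySem.Dict.mk items).get? s = none) : ∀ p ∈ items, p.1 ≠ s := by
  induction items with
  | nil => simp
  | cons p rest ih =>
    obtain ⟨k, v⟩ := p
    rw [PySem.Dict.get?_mk_cons] at h
    by_cases hk : k == s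
    · simp [hk] at h
    · simp only [hk, Bool.false_eq_true, if_false] at h
      intro q hq
      rcases List.mem_cons.mp hq with rfl | hq'
      · simpa using hk
      · exact ih h q hq' 

theorem pvDotToList (k : String) : ("." ++ k).toList = '.' :: k.toList := by
  rw [String.toList_append]
  rfl

theorem pvScan_some (items : List (String × Int)) (domain : String) (w : Int)
    (h : pvScan items domain = some w) :
    ∃ k, (k, w) ∈ items ∧ ('.' :: k.toList) <:+ domain.toList := by
  induction items with
  | nil => simp [pvScan] at h
  | cons p rest ih =>
    obtain ⟨k, w'⟩ := p
    simp only [pvScan, PySem.Str.endswith_eq, pvDotToList] at h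
    by_cases he : PySem.Chars.endswith domain.toList ('.' :: k.toList) = true
    · simp only [he, if_true, Option.some.injEq] at h
      subst h
      exact ⟨k, List.mem_cons_self .., (PySem.Chars.endswith_iff _ _).mp he⟩
    · simp only [he, if_false] at h
      obtain ⟨k', hmem, hs⟩ := ih h
      exact ⟨k', List.mem_cons_of_mem _ hmem, hs⟩

theorem pvScan_none (items : List (String × Int)) (domain : String)
    (h : pvScan items domain = none) :
    ∀ p ∈ items, ¬ (('.' :: p.1.toList) <:+ domain.toList) := by
  induction items with
  | nil => simp
  | cons p rest ih =>
    obtain ⟨k, w'⟩ := p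
    simp only [pvScan, PySem.Str.endswith_eq, pvDotToList] at h
    by_cases he : PySem.Chars.endswith domain.toList ('.' :: k.toList) = true
    · simp [he] at h
    · simp only [he] at h
      intro q hq
      rcases List.mem_cons.mp hq with rfl | hq'
      · intro hsuf
        exact he ((PySem.Chars.endswith_iff _ _).mpr hsuf)
      · exact ih h q hq' 

theorem pvLemA (domain : String) :
    domain_weight domain = (pvFind pvWeightsItems domain.toList).getD 0 := by
  have huniq := fun k1 k2 => pvUniq domain.toList k1 k2
  unfold domain_weight
  cases hp : pvPref.get? domain with
  | some w =>
    have hm : (domain, w) ∈ pvPrefItems := pvGet?_some_mem _ _ _ hp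
    rw [pvFind_eq_some pvWeightsItems domain.toList domain w
      (List.mem_append_left _ hm) (by rw [pvMatch_iff]; left; rfl) huniq pvNodup]
    rfl
  | none =>
    cases hsp : pvScan pvPrefItems domain with
    | some w =>
      obtain ⟨k, hm, hsuf⟩ := pvScan_some _ _ _ hsp
      rw [pvFind_eq_some pvWeightsItems domain.toList k w
        (List.mem_append_left _ hm) (by rw [pvMatch_iff]; right; exact hsuf) huniq pvNodup]
      rfl
    | none =>
      cases hl : pvLow.get? domain with
      | some w =>
        have hm : (domain, w) ∈ pvLowItems := pvGet?_some_mem _ _ _ hl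
        rw [pvFind_eq_some pvWeightsItems domain.toList domain w
          (List.mem_append_right _ hm) (by rw [pvMatch_iff]; left; rfl) huniq pvNodup]
        rfl
      | none =>
        cases hsl : pvScan pvLowItems domain with
        | some w =>
          obtain ⟨k, hm, hsuf⟩ := pvScan_some _ _ _ hsl
          rw [pvFind_eq_some pvWeightsItems domain.toList k w
            (List.mem_append_right _ hm) (by rw [pvMatch_iff]; right; exact hsuf) huniq pvNodup]
          rfl
        | none =>
          have hfind : pvFind pvWeightsItems domain.toList = none := by
            apply pvFind_eq_none
            intro p hp'
            rw [Bool.eq_false_iff, Ne, pvMatch_iff]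
            rintro (e | d)
            · rcases List.mem_append.mp hp' with h' | h'
              · exact pvGet?_none _ _ hp p h' (String.toList_inj.mp e.symm)
              · exact pvGet?_none _ _ hl p h' (String.toList_inj.mp e.symm)
            · rcases List.mem_append.mp hp' with h' | h'
              · exact pvScan_none _ _ hsp p h' d
              · exact pvScan_none _ _ hsl p h' d
          rw [hfind]
          rfl

theorem pvAfterDot_none (l : List Char) (h : pvAfterDot l = none) : '.' ∉ l := by
  induction l with
  | nil => simp
  | cons c rest ih =>
    by_cases hc : c = '.'
    · simp [pvAfterDot, hc] at h
    · simp only [pvAfterDot, hc, if_false] at h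
      intro hm
      rcases List.mem_cons.mp hm with h' | h'
      · exact hc h'.symm
      · exact ih h h' 

theorem pvAfterDot_some (l r : List Char) (h : pvAfterDot l = some r) :
    ∃ pre, l = pre ++ '.' :: r ∧ '.' ∉ pre := by
  induction l generalizing r with
  | nil => simp [pvAfterDot] at h
  | cons c rest ih =>
    by_cases hc : c = '.'
    · simp only [pvAfterDot, hc, if_true, Option.some.injEq] at h
      exact ⟨[], by simp [hc, h]⟩
    · simp only [pvAfterDot, hc, if_false] at h
      obtain ⟨pre, hpre1, hpre2⟩ := ih r h
      refine ⟨c :: pre, by simp [hpre1], fun hm => ?_⟩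
      rcases List.mem_cons.mp hm with h' | h'
      · exact hc h'.symm
      · exact hpre2 h' 

theorem pvMatch_step (l pre rest : List Char) (k : String)
    (hl : l = pre ++ '.' :: rest) (hpre : '.' ∉ pre) (hne : l ≠ k.toList) :
    pvMatch l k = pvMatch rest k := by
  apply Bool.coe_iff_coe.mp
  rw [pvMatch_iff, pvMatch_iff]
  subst hl
  constructor
  · rintro (e | d)
    · exact absurd e hne
    · rcases List.suffix_or_suffix_of_suffix d (List.suffix_append pre ('.' :: rest)) with hcmp | hcmp
      · rcases List.suffix_cons_iff.mp hcmp with he | hs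
        · left
          have h' : k.toList = rest := by injection he
          exact h'.symm
        · right; exact hs
      · obtain ⟨w1, hw1⟩ := hcmp
        cases w1 with
        | nil =>
          left
          have h0 : '.' :: rest = '.' :: k.toList := by simpa using hw1
          injection h0
        | cons a w' =>
          exfalso
          obtain ⟨u, hu⟩ := d
          have hp : u ++ (a :: w') = pre := by
            have h2 : (u ++ (a :: w')) ++ ('.' :: rest) = pre ++ ('.' :: rest) := by
              rw [List.append_assoc, hw1, hu]
            exact List.append_cancel_right h2
          have ha : a = '.' := by
            have h3 : a :: (w' ++ '.' :: rest) = '.' :: k.toList := by simpa using hw1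
            injection h3
          apply hpre
          rw [← hp, ha]
          exact List.mem_append_right _ (List.mem_cons_self ..)
  · rintro (e | d)
    · right
      rw [← e]
      exact List.suffix_append pre ('.' :: rest)
    · right
      exact d.trans ((List.suffix_cons '.' rest).trans (List.suffix_append pre ('.' :: rest)))

theorem pvLemB (l : List Char) :
    pvDW l = (pvFind pvWeightsItems l).getD 0 := by
  suffices h : ∀ (n : Nat) (l : List Char), l.length ≤ n →
      pvDW l = (pvFind pvWeightsItems l).getD 0 by
    exact h l.length l le_rfl
  intro n
  induction n with
  | zero =>
    intro l hn
    have : l = [] := List.eq_nil_of_length_eq_zero (Nat.le_zero.mp hn)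
    subst this
    rw [pvDW]
    cases hg : pvWeights.get? (String.ofList []) with
    | some w =>
      have hm : (String.ofList [], w) ∈ pvWeightsItems := pvGet?_some_mem _ _ _ hg
      rw [pvFind_eq_some pvWeightsItems [] (String.ofList []) w hm
        (by rw [pvMatch_iff]; left; exact String.toList_ofList.symm)
        (fun k1 k2 => pvUniq [] k1 k2) pvNodup]
      rfl
    | none =>
      have hfind : pvFind pvWeightsItems [] = none := by
        apply pvFind_eq_none
        intro p hp'
        rw [Bool.eq_false_iff, Ne, pvMatch_iff]
        rintro (e | d)
        · exact pvGet?_none _ _ hg p hp' (by rw [e, String.ofList_toList])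
        · simp at d
      rw [hfind]
      rfl
  | succ n ih =>
    intro l hn
    rw [pvDW]
    cases hg : pvWeights.get? (String.ofList l) with
    | some w =>
      have hm : (String.ofList l, w) ∈ pvWeightsItems := pvGet?_some_mem _ _ _ hg
      rw [pvFind_eq_some pvWeightsItems l (String.ofList l) w hm
        (by rw [pvMatch_iff]; left; exact String.toList_ofList.symm)
        (fun k1 k2 => pvUniq l k1 k2) pvNodup]
      rfl
    | none =>
      have hne : ∀ p ∈ pvWeightsItems, l ≠ p.1.toList := by
        intro p hp' e
        exact pvGet?_none _ _ hg p hp' (by rw [e, String.ofList_toList])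
      cases hd : pvAfterDot l with
      | none =>
        have hdot := pvAfterDot_none l hd
        have hfind : pvFind pvWeightsItems l = none := by
          apply pvFind_eq_none
          intro p hp'
          rw [Bool.eq_false_iff, Ne, pvMatch_iff]
          rintro (e | d)
          · exact hne p hp' e
          · exact hdot (d.subset (List.mem_cons_self ..))
        rw [hfind]
        rfl
      | some rest =>
        obtain ⟨pre, hl, hpre⟩ := pvAfterDot_some l rest hd
        have hrest : rest.length ≤ n := by
          have := pvAfterDot_length l rest hd
          omega
        show pvDW rest = (pvFind pvWeightsItems l).getD 0
        rw [ih rest hrest]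
        rw [pvFind_congr pvWeightsItems rest l
          (fun p hp' => (pvMatch_step l pre rest p.1 hl hpre (hne p hp')).symm)]

-- ===== VERDICT (by name: the statement is the Claim_ definition above) =====
theorem domain_weight_spec : Claim_equal_domain_weight := by
  intro domain _
  unfold Spec_domain_weight domain_weight_alt
  exact (pvLemA domain).trans (pvLemB domain.toList).symm
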